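-- pv_equiv track=rewrite | github.com/AryamanRoy/genomic-variant-svm | src/extract_features.py | get_severity
-- ===== SOURCE A (Python) =====
-- def get_severity(mc_string):
--     """Maps ClinVar MC terms to a numeric severity score (0-3)."""
--     mc_string = str(mc_string).lower()
--     if any(term in mc_string for term in ['stop_gained', 'frameshift', 'splice_acceptor', 'splice_donor']):
--         return 3
--     if 'missense' in mc_string or 'inframe' in mc_string:
--         return 2
--     if any(term in mc_string for term in ['synonymous', 'intron', '3_prime_utr', '5_prime_utr']):
--         return 1
--     return 0
-- ===== SOURCE B (Python) =====
-- _SEVERITY_TABLE = [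
--     ('stop_gained', 3), ('frameshift', 3), ('splice_acceptor', 3), ('splice_donor', 3),
--     ('missense', 2), ('inframe', 2),
--     ('synonymous', 1), ('intron', 1), ('3_prime_utr', 1), ('5_prime_utr', 1),
-- ]
--
-- def get_severity(mc_string):
--     """Maps ClinVar MC terms to a numeric severity score (0-3)."""
--     s = str(mc_string).lower()
--     best = 0
--     for term, score in _SEVERITY_TABLE:
--         if term in s and score > best:
--             best = score
--     return best
-- ===== Notes on version B (the rewrite author's own statement) =====
-- stated objective: simpler
-- what changed: Replaces the three-tier early-return chain with a flat data-driven term->score table scanned once while keeping a running maximum (no short-circuit; priority order equals descending score).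
import Mathlib
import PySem

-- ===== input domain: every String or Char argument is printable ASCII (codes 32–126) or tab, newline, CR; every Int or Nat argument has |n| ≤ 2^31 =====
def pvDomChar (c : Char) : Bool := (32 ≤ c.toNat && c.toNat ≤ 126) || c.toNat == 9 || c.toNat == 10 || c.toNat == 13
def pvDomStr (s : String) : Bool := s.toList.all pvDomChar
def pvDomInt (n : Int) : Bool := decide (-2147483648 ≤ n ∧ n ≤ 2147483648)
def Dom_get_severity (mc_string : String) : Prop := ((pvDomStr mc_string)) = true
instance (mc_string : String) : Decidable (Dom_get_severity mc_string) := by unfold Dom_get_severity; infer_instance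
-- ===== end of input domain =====

-- B: flat term->score table scanned with a running max instead of A's three-tier early-return chain (same results; objective: simpler).
-- ===== PORT A =====
def get_severity (mc_string : String) : Int :=
  let s := PySem.Str.lower mc_string
  if ["stop_gained", "frameshift", "splice_acceptor", "splice_donor"].any (fun term => PySem.Str.isIn term s) then 3
  else if PySem.Str.isIn "missense" s || PySem.Str.isIn "inframe" s then 2
  else if ["synonymous", "intron", "3_prime_utr", "5_prime_utr"].any (fun term => PySem.Str.isIn term s) then 1
  else 0

-- ===== PORT B =====
def severityTable : List (String × Int) :=
  [("stop_gained", 3), ("frameshift", 3), ("splice_acceptor", 3), ("splice_donor", 3),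
   ("missense", 2), ("inframe", 2),
   ("synonymous", 1), ("intron", 1), ("3_prime_utr", 1), ("5_prime_utr", 1)]

def get_severity_alt (mc_string : String) : Int :=
  let s := PySem.Str.lower mc_string
  severityTable.foldl (fun best p => if PySem.Str.isIn p.1 s && decide (p.2 > best) then p.2 else best) 0

-- ===== PRECONDITION & SPEC =====
def Spec_get_severity (mc_string : String) (out : Int) : Prop := out = get_severity_alt mc_string
instance (mc_string : String) (out : Int) : Decidable (Spec_get_severity mc_string out) := by unfold Spec_get_severity; infer_instance

-- ===== CLAIM (what is proved, stated in full; the proofs are below) =====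
def Claim_equal_get_severity : Prop := ∀ (mc_string : String), Dom_get_severity mc_string → Spec_get_severity mc_string (get_severity mc_string)

-- ===== LEMMAS AND PROOFS =====

lemma pv_fold_str (l : String) (xs : List (String × Int)) (a : Int) :
    xs.foldl (fun best p => if PySem.Str.isIn p.1 l && decide (p.2 > best) then p.2 else best) a
    = (xs.map (fun p => (PySem.Str.isIn p.1 l, p.2))).foldl
        (fun best (q : Bool × Int) => if q.1 && decide (q.2 > best) then q.2 else best) a := by
  induction xs generalizing a with
  | nil => rfl
  | cons x xs ih => simp only [List.foldl_cons, List.map_cons]; exact ih _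

lemma pv_keyB (b0 b1 b2 b3 b4 b5 b6 b7 b8 b9 : Bool) :
    (if (b0 || (b1 || (b2 || b3))) = true then (3 : Int)
     else if (b4 || b5) = true then 2
     else if (b6 || (b7 || (b8 || b9))) = true then 1
     else 0)
    = List.foldl (fun best (p : Bool × Int) => if p.1 && decide (p.2 > best) then p.2 else best) 0
        [(b0, 3), (b1, 3), (b2, 3), (b3, 3), (b4, 2), (b5, 2), (b6, 1), (b7, 1), (b8, 1), (b9, 1)] := by
  revert b0 b1 b2 b3 b4 b5 b6 b7 b8 b9
  decide

-- ===== VERDICT (by name: the statement is the Claim_ definition above) =====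
theorem get_severity_spec : Claim_equal_get_severity := by
  intro mc _
  unfold Spec_get_severity get_severity get_severity_alt severityTable
  simp only [List.any_cons, List.any_nil, Bool.or_false]
  rw [pv_fold_str]
  simp only [List.map_cons, List.map_nil]
  exact pv_keyB _ _ _ _ _ _ _ _ _ _
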